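-- pv_equiv track=rewrite | github.com/Py-Contributors/awesomeScripts | hill_cypher/encryption.py | change_to_key_matrix
-- ===== SOURCE A (Python) =====
-- def change_to_key_matrix(key, plain_text_size):
--     key_matrix = [[0] * plain_text_size for i in range(plain_text_size)]
--     key_iterator: int = 0
--     for i in range(plain_text_size):
--         for j in range(plain_text_size):
--             key_matrix[i][j] = ord(key[key_iterator]) % 65
--             key_iterator += 1
--     return key_matrix
-- ===== SOURCE B (Python) =====
-- def change_to_key_matrix(key, plain_text_size):
--     def rows_from(i):
--         if i >= plain_text_size:
--             return []
--         base = i * plain_text_size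
--         row = [ord(key[base + j]) % 65 for j in range(plain_text_size)]
--         return [row] + rows_from(i + 1)
--     return rows_from(0)
-- ===== Notes on version B (the rewrite author's own statement) =====
-- stated objective: alternative
-- what changed: B builds the matrix by recursion that peels one row at a time (computing each cell's key position as i*n+j and consing the rows), instead of A's preallocated zero matrix mutated cell-by-cell under nested loops with a running iterator counter.
import Mathlib
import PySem

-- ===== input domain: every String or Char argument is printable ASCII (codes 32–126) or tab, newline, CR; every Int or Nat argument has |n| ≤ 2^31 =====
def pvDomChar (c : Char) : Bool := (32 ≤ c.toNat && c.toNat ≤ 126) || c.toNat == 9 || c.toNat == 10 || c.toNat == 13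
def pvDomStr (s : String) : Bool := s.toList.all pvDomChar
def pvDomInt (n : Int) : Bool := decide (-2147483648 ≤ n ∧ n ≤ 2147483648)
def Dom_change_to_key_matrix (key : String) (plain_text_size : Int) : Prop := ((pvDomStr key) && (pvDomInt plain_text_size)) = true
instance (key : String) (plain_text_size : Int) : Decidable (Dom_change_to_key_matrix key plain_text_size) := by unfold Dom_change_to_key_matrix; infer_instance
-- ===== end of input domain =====

-- B builds the matrix by recursion peeling one row at a time (cell position i*n+j, rows
-- consed together), instead of A's preallocated zero matrix mutated cell-by-cell under
-- nested loops with a running counter; same cost.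

-- ===== PORT A =====
-- key_matrix[i][j] = ord(key[key_iterator]) % 65; key[it] is Str.pyGet? — the .getD 'A'
-- default is only reached where Python raises IndexError, which Pre_ excludes.
def change_to_key_matrix (key : String) (plain_text_size : Int) : List (List Int) :=
  let key_matrix : List (List Int) :=
    (PySem.List.pyRange 0 plain_text_size 1).map
      (fun _i => List.replicate plain_text_size.toNat (0 : Int))
  let res :=
    (PySem.List.pyRange 0 plain_text_size 1).foldl
      (fun (st : List (List Int) × Int) i =>
        (PySem.List.pyRange 0 plain_text_size 1).foldl
          (fun (st2 : List (List Int) × Int) j =>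
            let v : Int :=
              PySem.Int.mod (((PySem.Str.pyGet? key st2.2).getD 'A').toNat : Int) 65
            (PySem.List.pySetD st2.1 i
               (PySem.List.pySetD (PySem.List.pyGetD st2.1 i []) j v),
             st2.2 + 1))
          st)
      (key_matrix, 0)
  res.1

-- ===== PORT B =====
-- rows_from(i): recursion on i; terminates because n - i decreases. key[base+j] is
-- Str.pyGet?; the .getD 'A' default is only reached where Python raises IndexError
-- (excluded by Pre_).
def pvRowsFrom (key : String) (n : Int) (i : Int) : List (List Int) :=
  if _h : i ≥ n then []
  else
    let base := i * n
    let row : List Int :=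
      (PySem.List.pyRange 0 n 1).map
        (fun j => PySem.Int.mod (((PySem.Str.pyGet? key (base + j)).getD 'A').toNat : Int) 65)
    [row] ++ pvRowsFrom key n (i + 1)
termination_by (n - i).toNat
decreasing_by omega

def change_to_key_matrix_alt (key : String) (plain_text_size : Int) : List (List Int) :=
  pvRowsFrom key plain_text_size 0

-- ===== PRECONDITION & SPEC =====
-- Pre_ excludes exactly the inputs where A raises IndexError (key shorter than n*n).
def Pre_change_to_key_matrix (key : String) (plain_text_size : Int) : Prop :=
  plain_text_size ≤ 0 ∨ plain_text_size * plain_text_size ≤ PySem.Str.len key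
instance (key : String) (plain_text_size : Int) : Decidable (Pre_change_to_key_matrix key plain_text_size) := by unfold Pre_change_to_key_matrix; infer_instance
def pvWitness_change_to_key_matrix : String × Int := ("GYBNQKURP", 3)

def Spec_change_to_key_matrix (key : String) (plain_text_size : Int) (out : List (List Int)) : Prop := out = change_to_key_matrix_alt key plain_text_size
instance (key : String) (plain_text_size : Int) (out : List (List Int)) : Decidable (Spec_change_to_key_matrix key plain_text_size out) := by unfold Spec_change_to_key_matrix; infer_instance

-- ===== CLAIM (what is proved, stated in full; the proofs are below) =====
def Claim_equal_change_to_key_matrix : Prop := ∀ (key : String) (plain_text_size : Int), Dom_change_to_key_matrix key plain_text_size → Pre_change_to_key_matrix key plain_text_size → Spec_change_to_key_matrix key plain_text_size (change_to_key_matrix key plain_text_size)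

-- ===== LEMMAS AND PROOFS =====

/-- The cell value both ports compute at key position `it`. -/
def pvG (cs : List Char) (it : Int) : Int :=
  PySem.Int.mod (((PySem.List.pyGet? cs it).getD 'A').toNat : Int) 65

/-- A's inner loop: filling row i left-to-right with pvG values. -/
theorem pvA_inner (cs : List Char) (i : Nat) (k : Nat) :
    ∀ (mat : List (List Int)) (it : Int), i < mat.length → k ≤ (mat.getD i []).length →
    ((List.range k).map (fun (t : Nat) => (t : Int))).foldl
      (fun (st2 : List (List Int) × Int) j =>
        (PySem.List.pySetD st2.1 (i : Int)
           (PySem.List.pySetD (PySem.List.pyGetD st2.1 (i : Int) []) j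
             (PySem.Int.mod (((PySem.List.pyGet? cs st2.2).getD 'A').toNat : Int) 65)),
         st2.2 + 1))
      (mat, it)
      = (mat.set i ((List.range k).map (fun (t : Nat) => pvG cs (it + (t : Int))) ++ (mat.getD i []).drop k),
         it + k) := by
  induction k with
  | zero =>
    intro mat it hi _
    simp [List.getD, List.getElem?_eq_getElem hi]
  | succ k ih =>
    intro mat it hi hk
    have hk' : k < (mat.getD i []).length := hk
    rw [List.range_succ, List.map_append, List.foldl_append,
        ih mat it hi (le_of_lt hk')]
    simp only [List.map_cons, List.map_nil, List.foldl_cons, List.foldl_nil,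
      PySem.List.pySetD_natCast, PySem.List.pyGetD_natCast]
    have hgetD : mat.getD i [] = mat[i]'hi := by
      simp [List.getD, List.getElem?_eq_getElem hi]
    have hrow : ((mat.set i ((List.range k).map (fun t => pvG cs (it + ↑t)) ++
        (mat.getD i []).drop k)).getD i [])
        = (List.range k).map (fun t => pvG cs (it + ↑t)) ++ (mat.getD i []).drop k := by
      simp [List.getD, List.getElem?_set_self (by simpa using hi)]
    rw [hrow]
    have hv : ∀ x : Int,
        PySem.Int.mod (((PySem.List.pyGet? cs x).getD 'A').toNat : Int) 65 = pvG cs x :=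
      fun _ => rfl
    rw [hv]
    have hset : ∀ (row : List Int), k < row.length →
        (((List.range k).map (fun (t : Nat) => pvG cs (it + (t : Int)))) ++ row.drop k).set k
            (pvG cs (it + (k : Int)))
          = ((List.range (k + 1)).map (fun (t : Nat) => pvG cs (it + (t : Int)))) ++
            row.drop (k + 1) := by
      intro row hrowlen
      rw [List.set_append]
      rw [if_neg (by simp)]
      have hsub : k - ((List.range k).map (fun (t : Nat) => pvG cs (it + (t : Int)))).length = 0 := by
        simp
      rw [hsub]
      rw [List.range_succ, List.map_append]
      rw [List.drop_eq_getElem_cons hrowlen, List.set_cons_zero]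
      simp only [List.map_cons, List.map_nil, List.append_assoc, List.singleton_append]
    simp only [Prod.mk.injEq]
    refine ⟨?_, by push_cast; ring⟩
    rw [List.set_set]
    rw [hset (mat.getD i []) (by omega)]
    rw [List.range_succ]

/-- A's outer loop over rows. -/
theorem pvA_outer (cs : List Char) (m : Nat) (k : Nat) :
    ∀ (mat : List (List Int)) (it : Int), k ≤ mat.length → (∀ r ∈ mat, r.length = m) →
    ((List.range k).map (fun (t : Nat) => (t : Int))).foldl
      (fun (st : List (List Int) × Int) i =>
        ((List.range m).map (fun (t : Nat) => (t : Int))).foldl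
          (fun (st2 : List (List Int) × Int) j =>
            (PySem.List.pySetD st2.1 i
               (PySem.List.pySetD (PySem.List.pyGetD st2.1 i []) j
                 (PySem.Int.mod (((PySem.List.pyGet? cs st2.2).getD 'A').toNat : Int) 65)),
             st2.2 + 1))
          st)
      (mat, it)
      = ((List.range k).map
           (fun (i : Nat) => (List.range m).map (fun (t : Nat) => pvG cs (it + (i : Int) * (m : Int) + (t : Int))))
           ++ mat.drop k,
         it + (k : Int) * m) := by
  induction k with
  | zero => intro mat it _ _; simp
  | succ k ih =>
    intro mat it hmat hrows
    rw [List.range_succ, List.map_append, List.foldl_append,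
        ih mat it (by omega) hrows]
    simp only [List.map_cons, List.map_nil, List.foldl_cons, List.foldl_nil]
    have hlenrows : ((List.range k).map
        (fun (i : Nat) => (List.range m).map
          (fun (t : Nat) => pvG cs (it + (i : Int) * (m : Int) + (t : Int))))).length = k := by
      simp
    have hklt : k < mat.length := hmat
    have hmatk : ∀ d, ((List.range k).map
        (fun (i : Nat) => (List.range m).map
          (fun (t : Nat) => pvG cs (it + (i : Int) * (m : Int) + (t : Int)))) ++ mat.drop k).getD k d
        = mat[k]'hklt := by
      intro d
      rw [List.getD, List.getElem?_append_right (by omega)]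
      rw [hlenrows, Nat.sub_self, List.getElem?_drop, Nat.add_zero]
      simp [List.getElem?_eq_getElem hklt]
    have h1 : k < (((List.range k).map
        (fun (i : Nat) => (List.range m).map
          (fun (t : Nat) => pvG cs (it + (i : Int) * (m : Int) + (t : Int)))) ++ mat.drop k)).length := by
      simp; omega
    have h2 : m ≤ ((((List.range k).map
        (fun (i : Nat) => (List.range m).map
          (fun (t : Nat) => pvG cs (it + (i : Int) * (m : Int) + (t : Int)))) ++ mat.drop k)).getD k []).length := by
      rw [hmatk]
      exact le_of_eq (hrows _ (List.getElem_mem hklt)).symm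
    rw [pvA_inner cs k m _ (it + (k : Int) * (m : Int)) h1 h2]
    rw [hmatk]
    have hdropnil : (mat[k]'hklt).drop m = [] :=
      List.drop_eq_nil_of_le (by rw [hrows _ (List.getElem_mem hklt)])
    rw [hdropnil, List.append_nil]
    rw [List.set_append, if_neg (by rw [hlenrows]; omega), hlenrows, Nat.sub_self]
    rw [List.drop_eq_getElem_cons hklt, List.set_cons_zero]
    simp only [Prod.mk.injEq]
    refine ⟨?_, by push_cast; ring⟩
    simp

/-- B's recursion, in closed form: the rows from index m - d down. -/
theorem pvRowsFrom_eq (key : String) (m : Nat) (d : Nat) (hd : d ≤ m) :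
    pvRowsFrom key (m : Int) (((m - d : Nat) : Nat) : Int)
      = (List.range d).map (fun (s : Nat) =>
          (List.range m).map (fun (j : Nat) =>
            pvG key.toList (((m - d + s : Nat) : Int) * (m : Int) + (j : Int)))) := by
  induction d with
  | zero =>
    rw [pvRowsFrom]
    simp
  | succ d ih =>
    rw [pvRowsFrom]
    rw [dif_neg (by omega)]
    have hstep : ((m - (d + 1) : Nat) : Int) + 1 = ((m - d : Nat) : Int) := by omega
    simp only [hstep, ih (by omega)]
    rw [List.range_succ_eq_map]
    simp only [List.map_cons, List.map_map, List.singleton_append]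
    congr 1
    · rw [PySem.List.pyRange_zero_natCast, List.map_map]
      apply List.map_congr_left
      intro j _
      simp only [Function.comp_apply]
      have : (((m - (d + 1) : Nat) : Int)) * (m : Int) + (j : Int)
           = ((m - (d + 1) + 0 : Nat) : Int) * (m : Int) + (j : Int) := by push_cast; ring
      rw [← this]
      simp [pvG, PySem.Str.pyGet?_eq, PySem.Chars.pyGet?_eq_listPyGet?]
    · apply List.map_congr_left
      intro s _
      simp only [Function.comp_apply]
      apply List.map_congr_left
      intro j _
      have hidx : (m - (d + 1) + (s + 1) : Nat) = (m - d + s : Nat) := by omega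
      rw [hidx]

-- ===== VERDICT (by name: the statement is the Claim_ definition above) =====
theorem change_to_key_matrix_spec : Claim_equal_change_to_key_matrix := by
  intro key n hdom hpre
  unfold Spec_change_to_key_matrix
  by_cases hn : n ≤ 0
  · unfold change_to_key_matrix change_to_key_matrix_alt
    rw [PySem.List.pyRange_one_eq_nil hn, pvRowsFrom]
    rw [dif_pos (by omega)]
    simp
  · rw [not_le] at hn
    obtain ⟨m, rfl⟩ : ∃ m : Nat, n = (m : Int) := ⟨n.toNat, (Int.toNat_of_nonneg (le_of_lt hn)).symm⟩
    -- A side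
    unfold change_to_key_matrix
    rw [PySem.List.pyRange_zero_natCast]
    simp only [PySem.Str.pyGet?_eq, PySem.Chars.pyGet?_eq_listPyGet?, Int.toNat_natCast]
    rw [pvA_outer key.toList m m
        (((List.range m).map (fun (k : Nat) => (k : Int))).map
          (fun _i => List.replicate m (0 : Int))) 0
        (by simp) (by intro r hr; rcases List.mem_map.mp hr with ⟨_, _, rfl⟩; simp)]
    -- B side
    unfold change_to_key_matrix_alt
    rw [show (0 : Int) = (((m - m : Nat) : Nat) : Int) by simp,
        pvRowsFrom_eq key m m le_rfl]
    simp only [Nat.sub_self]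
    rw [List.drop_eq_nil_of_le (by simp), List.append_nil]
    apply List.map_congr_left
    intro i _
    apply List.map_congr_left
    intro t _
    congr 1
    push_cast
    ring
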